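-- pv_equiv track=rewrite | github.com/vigneshsabapathi/python-algorithms | graphs/eulerian_path_and_circuit_for_undirected_graph.py | check
-- ===== SOURCE A (Python) =====
-- def _is_connected(graph: dict) -> bool:
--     non_iso = [v for v in graph if graph[v]]
--     if not non_iso:
--         return True
--     visited, stack = {non_iso[0]}, [non_iso[0]]
--     while stack:
--         u = stack.pop()
--         for v in graph[u]:
--             if v not in visited:
--                 visited.add(v)
--                 stack.append(v)
--     return all(v in visited for v in non_iso)
--
-- def check(graph: dict) -> str:
--     """Return one of: 'Eulerian Circuit', 'Eulerian Path', 'Not Eulerian'.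
--
--     >>> check({0: [1, 1], 1: [0, 0]})
--     'Eulerian Circuit'
--     """
--     if not graph:
--         return "Not Eulerian"
--     if not _is_connected(graph):
--         return "Not Eulerian"
--     odd = sum(1 for v in graph if len(graph[v]) % 2 == 1)
--     if odd == 0:
--         return "Eulerian Circuit"
--     if odd == 2:
--         return "Eulerian Path"
--     return "Not Eulerian"
-- ===== SOURCE B (Python) =====
-- def check(graph):
--     """Return one of: 'Eulerian Circuit', 'Eulerian Path', 'Not Eulerian'.
--
--     Connectivity via round-based saturation to a fixed point instead of a
--     DFS stack: grow the component of the first non-isolated vertex by one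
--     neighbour layer per round until it stops growing.
--     """
--     if not graph:
--         return "Not Eulerian"
--     non_iso = [v for v in graph if graph[v]]
--     if non_iso:
--         comp = {non_iso[0]}
--         while True:
--             new = comp | {w for u in comp for w in graph[u]}
--             if len(new) == len(comp):
--                 break
--             comp = new
--         if any(v not in comp for v in non_iso):
--             return "Not Eulerian"
--     odd = sum(len(ns) % 2 for ns in graph.values())
--     if odd == 0:
--         return "Eulerian Circuit"
--     if odd == 2:
--         return "Eulerian Path"
--     return "Not Eulerian"
-- ===== Notes on version B (the rewrite author's own statement) =====
-- stated objective: alternative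
-- what changed: Connectivity is decided by round-based fixpoint saturation (union the component with its whole neighbour layer each round until its size stops growing) instead of an explicit DFS stack with a visited set, and the odd-degree count is summed over the dict's items instead of per-key lookups.
import Mathlib
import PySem

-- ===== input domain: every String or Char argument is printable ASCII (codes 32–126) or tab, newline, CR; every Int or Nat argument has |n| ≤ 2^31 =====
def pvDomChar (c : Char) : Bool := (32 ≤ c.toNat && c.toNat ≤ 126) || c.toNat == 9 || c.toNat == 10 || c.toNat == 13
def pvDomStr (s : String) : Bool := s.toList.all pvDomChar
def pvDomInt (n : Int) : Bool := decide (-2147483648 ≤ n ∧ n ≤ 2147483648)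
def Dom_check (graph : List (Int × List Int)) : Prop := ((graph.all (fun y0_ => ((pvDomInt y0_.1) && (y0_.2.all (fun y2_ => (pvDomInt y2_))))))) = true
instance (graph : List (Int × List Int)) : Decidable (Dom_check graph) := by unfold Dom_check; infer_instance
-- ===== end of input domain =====

-- B replaces A's stack-based DFS connectivity test by round-based fixpoint saturation
-- (grow the start vertex's component one neighbour layer per round until it stops growing);
-- the odd-degree count is summed over the dict items instead of key lookups. Objective: alternative.


-- ===== PORT A =====
-- graph[u] (KeyError excluded by Pre_check: every listed neighbour is a key)
def aAdj (graph : List (Int × List Int)) (u : Int) : List Int :=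
  PySem.Dict.getD ⟨graph⟩ u []

-- non_iso = [v for v in graph if graph[v]]
def aNonIso (graph : List (Int × List Int)) : List Int :=
  (graph.map Prod.fst).filter (fun v => !(aAdj graph v).isEmpty)

-- the body 'for v in graph[u]: if v not in visited: visited.add(v); stack.append(v)';
-- the stack's top (Python's last element, where pop()/append() act) is the list HEAD here
def aFold (graph : List (Int × List Int)) (u : Int)
    (vs : PySem.Set Int × List Int) : PySem.Set Int × List Int :=
  (aAdj graph u).foldl
    (fun vs v => if PySem.Set.contains vs.1 v then vs else (PySem.Set.add vs.1 v, v :: vs.2)) vs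

-- 'while stack:' — fuel only makes the recursion structural; 2*len(graph)+2 is enough under Pre_check
def aLoop (graph : List (Int × List Int)) : Nat → PySem.Set Int → List Int → PySem.Set Int
  | _, visited, [] => visited
  | 0, visited, _ :: _ => visited
  | fuel+1, visited, u :: stack =>
      let st := aFold graph u (visited, stack)
      aLoop graph fuel st.1 st.2

def aIsConnected (graph : List (Int × List Int)) : Bool :=
  match aNonIso graph with
  | [] => true
  | s :: _ =>
      let visited := aLoop graph (2 * graph.length + 2) (PySem.Set.add PySem.Set.empty s) [s]
      (aNonIso graph).all (fun v => PySem.Set.contains visited v)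

def check (graph : List (Int × List Int)) : String :=
  if graph.isEmpty then "Not Eulerian"
  else if !(aIsConnected graph) then "Not Eulerian"
  else
    let odd := (graph.map Prod.fst).countP (fun v => (aAdj graph v).length % 2 == 1)
    if odd == 0 then "Eulerian Circuit"
    else if odd == 2 then "Eulerian Path"
    else "Not Eulerian"

-- ===== PORT B =====
-- graph[u] (KeyError excluded by Pre_check, as on the A side)
def bAdj (graph : List (Int × List Int)) (u : Int) : List Int :=
  PySem.Dict.getD ⟨graph⟩ u []

def bNonIso (graph : List (Int × List Int)) : List Int :=
  (graph.map Prod.fst).filter (fun v => !(bAdj graph v).isEmpty)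

-- 'while True: new = comp | {...}; if len(new)==len(comp): break; comp = new'
-- (fuel only makes the recursion structural; len(graph)+1 rounds are enough under Pre_check)
def bLoop (graph : List (Int × List Int)) : Nat → PySem.Set Int → PySem.Set Int
  | 0, comp => comp
  | fuel+1, comp =>
      let nw := PySem.Set.union comp (PySem.Set.ofList (comp.flatMap (fun u => bAdj graph u)))
      if nw.length = comp.length then comp else bLoop graph fuel nw

-- 'if non_iso: … if any(v not in comp for v in non_iso): return "Not Eulerian"'
def bConnFail (graph : List (Int × List Int)) : Bool :=
  match bNonIso graph with
  | [] => false
  | s :: _ =>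
      let comp := bLoop graph (graph.length + 1) (PySem.Set.add PySem.Set.empty s)
      (bNonIso graph).any (fun v => !(PySem.Set.contains comp v))

def check_alt (graph : List (Int × List Int)) : String :=
  if graph.isEmpty then "Not Eulerian"
  else if bConnFail graph then "Not Eulerian"
  else
    let odd := (graph.map (fun p => p.2.length % 2)).sum
    if odd == 0 then "Eulerian Circuit"
    else if odd == 2 then "Eulerian Path"
    else "Not Eulerian"

-- ===== PRECONDITION & SPEC =====
-- helpers describing A's raising condition (independent of the ports):
-- the dict lookup, the first non-isolated key, and the set of vertices reachable from it,
-- computed as the iterated one-layer closure (enough iterations to reach the fixed point)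
def preAdj (graph : List (Int × List Int)) (u : Int) : List Int :=
  ((graph.find? (fun p => p.1 == u)).map (fun x => x.2)).getD []

def preStart (graph : List (Int × List Int)) : List Int :=
  ((graph.map Prod.fst).filter (fun v => !(preAdj graph v).isEmpty)).take 1

def preStep (graph : List (Int × List Int)) (S : List Int) : List Int :=
  PySem.List.dedup (S ++ S.flatMap (preAdj graph))

def preReach (graph : List (Int × List Int)) (s : Int) : List Int :=
  (preStep graph)^[(graph.flatMap Prod.snd).length + 1] [s]

-- Pre_ excludes graphs on which A's DFS raises KeyError (a vertex reachable from the first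
-- non-isolated key is missing from the keys), and association lists with duplicate keys
-- (impossible for a Python dict).
def Pre_check (graph : List (Int × List Int)) : Prop :=
  (graph.map Prod.fst).Nodup ∧
  ∀ s ∈ preStart graph, ∀ v ∈ preReach graph s, v ∈ graph.map Prod.fst
instance (graph : List (Int × List Int)) : Decidable (Pre_check graph) := by
  unfold Pre_check; infer_instance

def pvWitness_check : (List (Int × List Int)) := [(0, [1, 1]), (1, [0, 0])]

def Spec_check (graph : List (Int × List Int)) (out : String) : Prop := out = check_alt graph
instance (graph : List (Int × List Int)) (out : String) : Decidable (Spec_check graph out) := by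
  unfold Spec_check; infer_instance

-- ===== CLAIM (what is proved, stated in full; the proofs are below) =====
def Claim_equal_check : Prop :=
  ∀ (graph : List (Int × List Int)), Dom_check graph → Pre_check graph →
    Spec_check graph (check graph)

-- ===== LEMMAS AND PROOFS =====

-- reachability from s along the dict's adjacency (missing keys have no out-edges)
inductive Reach (graph : List (Int × List Int)) (s : Int) : Int → Prop
  | base : Reach graph s s
  | step (u v : Int) : Reach graph s u → v ∈ aAdj graph u → Reach graph s v

-- number of keys not yet in S (the loop measures)
def unvis (graph : List (Int × List Int)) (S : List Int) : Nat :=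
  ((PySem.Set.ofList (graph.map Prod.fst)).filter (fun k => !(S.contains k))).length

theorem lookup_eq_snd (graph : List (Int × List Int)) (h : (graph.map Prod.fst).Nodup)
    (p : Int × List Int) (hp : p ∈ graph) : aAdj graph p.1 = p.2 := by
  unfold aAdj PySem.Dict.getD PySem.Dict.get?
  induction graph with
  | nil => simp at hp
  | cons q t ih =>
    simp only [List.map_cons, List.nodup_cons] at h
    by_cases hq : q.1 = p.1
    · have hpq : p = q := by
        rcases List.mem_cons.mp hp with h1 | hpt
        · exact h1
        · exact absurd (hq ▸ List.mem_map_of_mem (f := Prod.fst) hpt) h.1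
      subst hpq
      simp
    · have hpt : p ∈ t := by
        rcases List.mem_cons.mp hp with h1 | hpt
        · exact absurd (h1 ▸ rfl) hq
        · exact hpt
      have := ih h.2 hpt
      simpa [show (q.1 == p.1) = false by simp [hq]] using this

theorem countP_lt_aux (l : List Int) (p q : Int → Bool) (h : ∀ a ∈ l, p a → q a) (v : Int)
    (hv : v ∈ l) (hp : p v = false) (hq : q v = true) : l.countP p < l.countP q := by
  induction l with
  | nil => simp at hv
  | cons a t ih =>
    simp only [List.countP_cons]
    by_cases hav : a = v
    · subst hav
      have := List.countP_mono_left (l := t) (fun a ha => h a (List.mem_cons_of_mem _ ha))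
      rw [hp, hq]
      simp only [Bool.false_eq_true, if_false, if_true]
      omega
    · have hvt : v ∈ t := by rcases List.mem_cons.mp hv with h1 | h1; exact absurd h1.symm hav; exact h1
      have hlt := ih (fun a ha => h a (List.mem_cons_of_mem _ ha)) hvt
      have hle : (if p a = true then 1 else 0) ≤ (if q a = true then 1 else 0) := by
        by_cases hpa : p a = true
        · rw [if_pos hpa, if_pos (h a List.mem_cons_self hpa)]
        · rw [if_neg hpa]; omega
      omega

theorem unvis_mono (graph : List (Int × List Int)) (S T : List Int)
    (h : ∀ x ∈ S, x ∈ T) : unvis graph T ≤ unvis graph S := by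
  unfold unvis
  rw [← List.countP_eq_length_filter, ← List.countP_eq_length_filter]
  apply List.countP_mono_left
  intro a _ ha
  simp at ha ⊢
  intro hx
  exact absurd (h a hx) ha

theorem unvis_strict (graph : List (Int × List Int)) (S : List Int) (v : Int)
    (hk : v ∈ graph.map Prod.fst) (hv : v ∉ S) :
    unvis graph (S ++ [v]) < unvis graph S := by
  unfold unvis
  rw [← List.countP_eq_length_filter, ← List.countP_eq_length_filter]
  apply countP_lt_aux _ _ _ _ v
  · simp [PySem.Set.mem_ofList, hk]
  · simp
  · simpa using hv
  · intro a _ ha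
    simp at ha ⊢
    tauto

theorem foldStep_spec (graph : List (Int × List Int)) (ns : List Int) :
    ∀ (visited : PySem.Set Int) (stack : List Int),
      (∀ x ∈ stack, x ∈ visited) → visited.Nodup → stack.Nodup →
      (∀ x, x ∈ (ns.foldl (fun vs v => if PySem.Set.contains vs.1 v then vs else (PySem.Set.add vs.1 v, v :: vs.2)) (visited, stack)).1 ↔ x ∈ visited ∨ x ∈ ns) ∧
      (∀ x, x ∈ (ns.foldl (fun vs v => if PySem.Set.contains vs.1 v then vs else (PySem.Set.add vs.1 v, v :: vs.2)) (visited, stack)).2 ↔ x ∈ stack ∨ (x ∈ ns ∧ x ∉ visited)) ∧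
      (∀ x ∈ (ns.foldl (fun vs v => if PySem.Set.contains vs.1 v then vs else (PySem.Set.add vs.1 v, v :: vs.2)) (visited, stack)).2, x ∈ (ns.foldl (fun vs v => if PySem.Set.contains vs.1 v then vs else (PySem.Set.add vs.1 v, v :: vs.2)) (visited, stack)).1) ∧
      (ns.foldl (fun vs v => if PySem.Set.contains vs.1 v then vs else (PySem.Set.add vs.1 v, v :: vs.2)) (visited, stack)).1.Nodup ∧
      (ns.foldl (fun vs v => if PySem.Set.contains vs.1 v then vs else (PySem.Set.add vs.1 v, v :: vs.2)) (visited, stack)).2.Nodup ∧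
      ((∀ v ∈ ns, v ∈ graph.map Prod.fst) →
        (ns.foldl (fun vs v => if PySem.Set.contains vs.1 v then vs else (PySem.Set.add vs.1 v, v :: vs.2)) (visited, stack)).2.length
          + 2 * unvis graph (ns.foldl (fun vs v => if PySem.Set.contains vs.1 v then vs else (PySem.Set.add vs.1 v, v :: vs.2)) (visited, stack)).1
          ≤ stack.length + 2 * unvis graph visited) := by
  induction ns with
  | nil =>
    intro visited stack hsub hnv hns
    simp; exact ⟨hsub, hnv, hns⟩
  | cons v t ih =>
    intro visited stack hsub hnv hns
    simp only [List.foldl_cons]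
    by_cases hc : v ∈ visited
    · rw [if_pos (by simpa [PySem.Set.contains_iff] using hc)]
      obtain ⟨m1, m2, msub, n1, n2, meas⟩ := ih visited stack hsub hnv hns
      refine ⟨?_, ?_, msub, n1, n2, fun hk => meas (fun w hw => hk w (List.mem_cons_of_mem _ hw))⟩
      · intro x; rw [m1]; simp only [List.mem_cons]
        constructor
        · rintro (h|h); exact Or.inl h; exact Or.inr (Or.inr h)
        · rintro (h|h|h); exact Or.inl h; exact Or.inl (h ▸ hc); exact Or.inr h
      · intro x; rw [m2]; simp only [List.mem_cons]
        constructor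
        · rintro (h|⟨h1,h2⟩); exact Or.inl h; exact Or.inr ⟨Or.inr h1, h2⟩
        · rintro (h|⟨(h1|h1),h2⟩); exact Or.inl h; exact absurd (h1 ▸ hc) h2
          exact Or.inr ⟨h1, h2⟩
    · rw [if_neg (by simpa [PySem.Set.contains_iff] using hc), PySem.Set.add_of_not_mem hc]
      have hvs : v ∉ stack := fun h => hc (hsub v h)
      obtain ⟨m1, m2, msub, n1, n2, meas⟩ := ih (visited ++ [v]) (v :: stack)
        (by intro x hx
            rcases List.mem_cons.mp hx with h1|h1
            · simp [h1]
            · simp [hsub x h1])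
        (by simp only [List.nodup_append, List.nodup_cons]
            exact ⟨hnv, by simp, fun a ha => by simp; exact fun he => hc (he ▸ ha)⟩)
        (by simp [hns, hvs])
      refine ⟨?_, ?_, msub, n1, n2, ?_⟩
      · intro x; rw [m1]
        simp only [List.mem_cons, List.mem_append]
        tauto
      · intro x; rw [m2]
        simp only [List.mem_cons, List.mem_append, not_or]
        constructor
        · rintro (h|⟨h1,h2,h3⟩)
          · rcases h with h|h
            · exact Or.inr ⟨Or.inl h, h ▸ hc⟩
            · exact Or.inl h
          · exact Or.inr ⟨Or.inr h1, h2⟩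
        · rintro (h|⟨(h1|h1),h2⟩)
          · exact Or.inl (Or.inr h)
          · exact Or.inl (Or.inl h1)
          · by_cases hxv : x = v
            · exact Or.inl (Or.inl hxv)
            · exact Or.inr ⟨h1, h2, hxv, by simp⟩
      · intro hk
        have h1 := meas (fun w hw => hk w (List.mem_cons_of_mem _ hw))
        have h2 := unvis_strict graph visited v (hk v List.mem_cons_self) hc
        simp only [List.length_cons] at h1
        omega

theorem reach_closed (graph : List (Int × List Int)) (s : Int) (S : List Int)
    (hs : s ∈ S) (hcl : ∀ u ∈ S, ∀ v ∈ aAdj graph u, v ∈ S) :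
    ∀ v, Reach graph s v → v ∈ S := by
  intro v hv
  induction hv with
  | base => exact hs
  | step u v _ hadj ih => exact hcl u ih v hadj

theorem bAdj_eq_aAdj : bAdj = aAdj := rfl

theorem unvis_le (graph : List (Int × List Int)) (S : List Int) :
    unvis graph S ≤ graph.length := by
  unfold unvis
  calc ((PySem.Set.ofList (graph.map Prod.fst)).filter (fun k => !(S.contains k))).length
      ≤ (PySem.Set.ofList (graph.map Prod.fst)).length := List.length_filter_le _ _
    _ ≤ (graph.map Prod.fst).length := PySem.Set.length_ofList_le _
    _ = graph.length := List.length_map _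

theorem sum_mod2 (l : List (Int × List Int)) :
    l.countP (fun p => p.2.length % 2 == 1) = (l.map (fun p => p.2.length % 2)).sum := by
  induction l with
  | nil => rfl
  | cons p t ih =>
    simp only [List.countP_cons, List.map_cons, List.sum_cons, ih]
    by_cases h : p.2.length % 2 = 1
    · simp [h]; omega
    · have h0 : p.2.length % 2 = 0 := by omega
      simp [h0]

-- one DFS expansion step is the generic fold characterised above

theorem preAdj_eq_aAdj : preAdj = aAdj := rfl

theorem preStart_eq_take_aNonIso (graph : List (Int × List Int)) :
    preStart graph = (aNonIso graph).take 1 := rfl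

theorem preStep_eq (graph : List (Int × List Int)) (S : List Int) (hS : S.Nodup) :
    preStep graph S
      = S ++ (PySem.Set.ofList (S.flatMap (preAdj graph))).filter (fun y => !(S.contains y)) := by
  unfold preStep
  have hol : PySem.Set.ofList S = S := PySem.Set.ofList_eq_self_of_nodup S hS
  rw [PySem.List.dedup_eq_ofList, PySem.Set.ofList_append,
      PySem.Set.update_eq_append_filter, hol]
  simp [PySem.Set.contains_eq_listContains]

theorem nodup_preStep (graph : List (Int × List Int)) (S : List Int) :
    (preStep graph S).Nodup := by
  unfold preStep
  rw [PySem.List.dedup_eq_ofList]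
  exact PySem.Set.nodup_ofList _

theorem subset_preStep (graph : List (Int × List Int)) (S : List Int) :
    ∀ x ∈ S, x ∈ preStep graph S := by
  intro x hx
  unfold preStep
  rw [PySem.List.dedup_eq_ofList, PySem.Set.mem_ofList]
  exact List.mem_append.mpr (Or.inl hx)

theorem mem_preStep (graph : List (Int × List Int)) (S : List Int) (x : Int) :
    x ∈ preStep graph S ↔ x ∈ S ∨ ∃ u ∈ S, x ∈ preAdj graph u := by
  unfold preStep
  rw [PySem.List.dedup_eq_ofList, PySem.Set.mem_ofList]
  simp [List.mem_flatMap]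

theorem preStep_fix_closed (graph : List (Int × List Int)) (S : List Int)
    (hfix : preStep graph S = S) : ∀ u ∈ S, ∀ v ∈ preAdj graph u, v ∈ S := by
  intro u hu v hv
  rw [← hfix, mem_preStep]
  exact Or.inr ⟨u, hu, hv⟩

theorem nodup_iter (graph : List (Int × List Int)) (s : Int) (k : Nat) :
    ((preStep graph)^[k] [s]).Nodup := by
  cases k with
  | zero => simp
  | succ k => rw [Function.iterate_succ_apply']; exact nodup_preStep _ _

theorem preStep_grow (graph : List (Int × List Int)) (S : List Int) (hS : S.Nodup)
    (hne : preStep graph S ≠ S) : S.length < (preStep graph S).length := by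
  rw [preStep_eq graph S hS]
  rw [preStep_eq graph S hS] at hne
  rw [List.length_append]
  cases hfil : ((PySem.Set.ofList (S.flatMap (preAdj graph))).filter (fun y => !(S.contains y))) with
  | nil => exact absurd (by rw [hfil]; simp) hne
  | cons a t => simp

theorem preAdj_mem_flat (graph : List (Int × List Int)) (u x : Int)
    (hx : x ∈ preAdj graph u) : x ∈ graph.flatMap Prod.snd := by
  unfold preAdj at hx
  cases hfind : List.find? (fun p => p.1 == u) graph with
  | none => simp [hfind] at hx
  | some p =>
    simp [hfind] at hx
    exact List.mem_flatMap.mpr ⟨p, List.mem_of_find?_eq_some hfind, hx⟩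

theorem iter_sub_flat (graph : List (Int × List Int)) (s : Int) (k : Nat) :
    ∀ x ∈ (preStep graph)^[k] [s], x ∈ s :: graph.flatMap Prod.snd := by
  induction k with
  | zero =>
    intro x hx
    simp only [Function.iterate_zero, id] at hx
    rw [List.mem_singleton] at hx
    exact hx ▸ List.mem_cons_self
  | succ k ih =>
    intro x hx
    rw [Function.iterate_succ_apply', mem_preStep] at hx
    rcases hx with h | ⟨u, _, hadj⟩
    · exact ih x h
    · exact List.mem_cons_of_mem _ (preAdj_mem_flat graph u x hadj)

theorem nodup_subset_length (l m : List Int) (hl : l.Nodup) (h : ∀ x ∈ l, x ∈ m) :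
    l.length ≤ m.length := by
  classical
  have h1 : l.length = l.toFinset.card := (List.toFinset_card_of_nodup hl).symm
  have h2 : l.toFinset ⊆ m.toFinset := by
    intro a ha
    rw [List.mem_toFinset] at ha ⊢
    exact h a ha
  calc l.length = l.toFinset.card := h1
    _ ≤ m.toFinset.card := Finset.card_le_card h2
    _ ≤ m.length := m.toFinset_card_le

theorem preReach_closed (graph : List (Int × List Int)) (s : Int) :
    preStep graph (preReach graph s) = preReach graph s := by
  set N := (graph.flatMap Prod.snd).length + 1 with hN
  have key : ∀ k, (preStep graph)^[k+1] [s] = (preStep graph)^[k] [s] ∨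
      k + 1 ≤ ((preStep graph)^[k] [s]).length := by
    intro k
    induction k with
    | zero => right; simp
    | succ k ih =>
      rcases ih with h | h
      · left
        simp only [Function.iterate_succ_apply'] at h ⊢
        rw [h]; exact h
      · by_cases hfix : preStep graph ((preStep graph)^[k] [s]) = (preStep graph)^[k] [s]
        · left
          simp only [Function.iterate_succ_apply']
          rw [hfix]; exact hfix
        · right
          have := preStep_grow graph _ (nodup_iter graph s k) hfix
          rw [Function.iterate_succ_apply']
          omega
  rcases key N with h | h
  · show preStep graph ((preStep graph)^[N] [s]) = (preStep graph)^[N] [s]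
    rw [← Function.iterate_succ_apply' (preStep graph) N [s]]
    exact h
  · exfalso
    have hb := nodup_subset_length _ _ (nodup_iter graph s N) (iter_sub_flat graph s N)
    simp only [List.length_cons] at hb
    omega

theorem reach_sub_preReach (graph : List (Int × List Int)) (s : Int) :
    ∀ v, Reach graph s v → v ∈ preReach graph s := by
  have hs : s ∈ preReach graph s := by
    unfold preReach
    generalize (graph.flatMap Prod.snd).length + 1 = k
    induction k with
    | zero => simp
    | succ k ih => rw [Function.iterate_succ_apply']; exact subset_preStep graph _ s ih
  have hcl := preStep_fix_closed graph _ (preReach_closed graph s)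
  rw [preAdj_eq_aAdj] at hcl
  exact reach_closed graph s (preReach graph s) hs hcl

theorem aFold_spec (graph : List (Int × List Int)) (u : Int) :
    ∀ (visited : PySem.Set Int) (stack : List Int),
      (∀ x ∈ stack, x ∈ visited) → visited.Nodup → stack.Nodup →
      (∀ x, x ∈ (aFold graph u (visited, stack)).1 ↔ x ∈ visited ∨ x ∈ aAdj graph u) ∧
      (∀ x, x ∈ (aFold graph u (visited, stack)).2 ↔ x ∈ stack ∨ (x ∈ aAdj graph u ∧ x ∉ visited)) ∧
      (∀ x ∈ (aFold graph u (visited, stack)).2, x ∈ (aFold graph u (visited, stack)).1) ∧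
      (aFold graph u (visited, stack)).1.Nodup ∧ (aFold graph u (visited, stack)).2.Nodup ∧
      ((∀ v ∈ aAdj graph u, v ∈ graph.map Prod.fst) →
        (aFold graph u (visited, stack)).2.length + 2 * unvis graph (aFold graph u (visited, stack)).1
          ≤ stack.length + 2 * unvis graph visited) :=
  foldStep_spec graph (aAdj graph u)

-- the DFS loop: its result contains the initial visited set, is closed under adjacency,
-- and every element is reachable

theorem aLoop_spec (graph : List (Int × List Int)) (s : Int)
    (hRK : ∀ v, Reach graph s v → v ∈ graph.map Prod.fst) :
    ∀ (fuel : Nat) (visited : PySem.Set Int) (stack : List Int),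
      (∀ x ∈ stack, x ∈ visited) → visited.Nodup → stack.Nodup →
      (∀ x ∈ visited, Reach graph s x) →
      (∀ u ∈ visited, u ∈ stack ∨ ∀ v ∈ aAdj graph u, v ∈ visited) →
      stack.length + 2 * unvis graph visited < fuel →
      (∀ x ∈ visited, x ∈ aLoop graph fuel visited stack) ∧
      (∀ x ∈ aLoop graph fuel visited stack, Reach graph s x) ∧
      (∀ u ∈ aLoop graph fuel visited stack, ∀ v ∈ aAdj graph u,
        v ∈ aLoop graph fuel visited stack) := by
  intro fuel
  induction fuel with
  | zero =>
    intro visited stack hsub hnv hns hreach hcl hm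
    cases stack with
    | nil =>
      exact ⟨fun x hx => hx, hreach, fun u hu v hv => ((hcl u hu).resolve_left (by simp)) v hv⟩
    | cons u rest => exact absurd hm (Nat.not_lt_zero _)
  | succ fuel ih =>
    intro visited stack hsub hnv hns hreach hcl hm
    cases stack with
    | nil =>
      exact ⟨fun x hx => hx, hreach, fun u hu v hv => ((hcl u hu).resolve_left (by simp)) v hv⟩
    | cons u rest =>
      have hrest : ∀ x ∈ rest, x ∈ visited := fun x hx => hsub x (List.mem_cons_of_mem _ hx)
      have hnr : rest.Nodup := hns.of_cons
      obtain ⟨m1, m2, msub, n1, n2, meas⟩ := aFold_spec graph u visited rest hrest hnv hnr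
      have hu_vis : u ∈ visited := hsub u List.mem_cons_self
      have hkeys : ∀ v ∈ aAdj graph u, v ∈ graph.map Prod.fst :=
        fun v hv => hRK v (Reach.step u v (hreach u hu_vis) hv)
      have hvis_sub : ∀ x ∈ visited, x ∈ (aFold graph u (visited, rest)).1 :=
        fun x hx => (m1 x).mpr (Or.inl hx)
      have step := ih (aFold graph u (visited, rest)).1 (aFold graph u (visited, rest)).2
        msub n1 n2
        (by intro x hx
            rcases (m1 x).mp hx with h|h
            · exact hreach x h
            · exact Reach.step u x (hreach u hu_vis) h)
        (by intro w hw
            rcases (m1 w).mp hw with h|h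
            · rcases hcl w h with h2|h2
              · rcases List.mem_cons.mp h2 with h3|h3
                · refine Or.inr ?_
                  intro v hv
                  exact (m1 v).mpr (Or.inr (h3 ▸ hv))
                · exact Or.inl ((m2 w).mpr (Or.inl h3))
              · exact Or.inr (fun v hv => hvis_sub v (h2 v hv))
            · by_cases hwv : w ∈ visited
              · rcases hcl w hwv with h2|h2
                · rcases List.mem_cons.mp h2 with h3|h3
                  · exact Or.inr (fun v hv => (m1 v).mpr (Or.inr (h3 ▸ hv)))
                  · exact Or.inl ((m2 w).mpr (Or.inl h3))
                · exact Or.inr (fun v hv => hvis_sub v (h2 v hv))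
              · exact Or.inl ((m2 w).mpr (Or.inr ⟨h, hwv⟩)))
        (by have := meas hkeys
            simp only [List.length_cons] at hm
            omega)
      refine ⟨?_, ?_, ?_⟩
      · intro x hx
        have := step.1 x (hvis_sub x hx)
        simpa [aLoop] using this
      · intro x hx
        exact step.2.1 x (by simpa [aLoop] using hx)
      · intro w hw v hv
        have := step.2.2 w (by simpa [aLoop] using hw) v hv
        simpa [aLoop] using this

-- the saturation loop: same three properties

theorem bLoop_spec (graph : List (Int × List Int)) (s : Int)
    (hRK : ∀ v, Reach graph s v → v ∈ graph.map Prod.fst) :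
    ∀ (fuel : Nat) (comp : PySem.Set Int),
      comp.Nodup → (∀ x ∈ comp, x ∈ graph.map Prod.fst) →
      (∀ x ∈ comp, Reach graph s x) →
      unvis graph comp < fuel →
      (∀ x ∈ comp, x ∈ bLoop graph fuel comp) ∧
      (∀ x ∈ bLoop graph fuel comp, Reach graph s x) ∧
      (∀ u ∈ bLoop graph fuel comp, ∀ v ∈ aAdj graph u, v ∈ bLoop graph fuel comp) := by
  intro fuel
  induction fuel with
  | zero => intro comp _ _ _ hm; exact absurd hm (Nat.not_lt_zero _)
  | succ fuel ih =>
    intro comp hnd hkeys hreach hm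
    simp only [bLoop]
    set X : List Int := comp.flatMap (fun u => bAdj graph u) with hX
    have hmemX : ∀ v, v ∈ X ↔ ∃ u ∈ comp, v ∈ aAdj graph u := by
      intro v
      simp [hX, List.mem_flatMap, bAdj_eq_aAdj]
    have hnw : PySem.Set.union comp (PySem.Set.ofList X)
        = comp ++ (PySem.Set.ofList X).filter (fun y => !(comp.contains y)) := by
      show comp.update (PySem.Set.ofList X) = _
      rw [PySem.Set.update_eq_append_filter, PySem.Set.ofList_ofList]
    by_cases hlen : (PySem.Set.union comp (PySem.Set.ofList X)).length = comp.length
    · rw [if_pos hlen]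
      have hext : (PySem.Set.ofList X).filter (fun y => !(comp.contains y)) = [] := by
        have := congrArg List.length hnw
        rw [hlen, List.length_append] at this
        have : ((PySem.Set.ofList X).filter (fun y => !(comp.contains y))).length = 0 := by omega
        exact List.eq_nil_of_length_eq_zero this
      refine ⟨fun x hx => hx, hreach, ?_⟩
      intro u hu v hv
      by_cases hvc : v ∈ comp
      · exact hvc
      · exfalso
        have hvX : v ∈ PySem.Set.ofList X := by
          rw [PySem.Set.mem_ofList]
          exact (hmemX v).mpr ⟨u, hu, hv⟩
        have : v ∈ (PySem.Set.ofList X).filter (fun y => !(comp.contains y)) := by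
          rw [List.mem_filter]
          exact ⟨hvX, by simpa [PySem.Set.contains_iff] using hvc⟩
        rw [hext] at this
        exact absurd this (List.not_mem_nil)
    · rw [if_neg hlen]
      have hsubnw : ∀ x ∈ comp, x ∈ PySem.Set.union comp (PySem.Set.ofList X) := by
        intro x hx; rw [PySem.Set.mem_union]; exact Or.inl hx
      have hnwmem : ∀ x ∈ PySem.Set.union comp (PySem.Set.ofList X),
          x ∈ comp ∨ ∃ u ∈ comp, x ∈ aAdj graph u := by
        intro x hx
        rcases (PySem.Set.mem_union comp (PySem.Set.ofList X) x).mp hx with h|h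
        · exact Or.inl h
        · exact Or.inr ((hmemX x).mp (by rwa [PySem.Set.mem_ofList] at h))
      have hnwkeys : ∀ x ∈ PySem.Set.union comp (PySem.Set.ofList X), x ∈ graph.map Prod.fst := by
        intro x hx
        rcases hnwmem x hx with h|⟨u, hu, hadj⟩
        · exact hkeys x h
        · exact hRK x (Reach.step u x (hreach u hu) hadj)
      have hnwreach : ∀ x ∈ PySem.Set.union comp (PySem.Set.ofList X), Reach graph s x := by
        intro x hx
        rcases hnwmem x hx with h|⟨u, hu, hadj⟩
        · exact hreach x h
        · exact Reach.step u x (hreach u hu) hadj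
      have hnwnd : (PySem.Set.union comp (PySem.Set.ofList X)).Nodup :=
        PySem.Set.nodup_union comp (PySem.Set.ofList X) hnd
      -- strict growth: some new element is a key not in comp
      have hmeas : unvis graph (PySem.Set.union comp (PySem.Set.ofList X)) < unvis graph comp := by
        have hextne : (PySem.Set.ofList X).filter (fun y => !(comp.contains y)) ≠ [] := by
          intro hnil
          apply hlen
          rw [hnw, hnil]
          simp
        obtain ⟨e, he⟩ := List.exists_mem_of_ne_nil _ hextne
        have heX : e ∈ PySem.Set.ofList X := (List.mem_filter.mp he).1
        have henc : e ∉ comp := by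
          have := (List.mem_filter.mp he).2
          simpa [PySem.Set.contains_iff] using this
        have hek : e ∈ graph.map Prod.fst := by
          rcases (hmemX e).mp (by rwa [PySem.Set.mem_ofList] at heX) with ⟨u, hu, hadj⟩
          exact hRK e (Reach.step u e (hreach u hu) hadj)
        have h1 : unvis graph (PySem.Set.union comp (PySem.Set.ofList X)) ≤ unvis graph (comp ++ [e]) := by
          apply unvis_mono
          intro x hx
          rcases List.mem_append.mp hx with h|h
          · exact hsubnw x h
          · rw [PySem.Set.mem_union]
            exact Or.inr ((List.mem_singleton.mp h) ▸ heX)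
        have h2 := unvis_strict graph comp e hek henc
        omega
      obtain ⟨c1, c2, c3⟩ := ih (PySem.Set.union comp (PySem.Set.ofList X)) hnwnd hnwkeys hnwreach (by omega)
      exact ⟨fun x hx => c1 x (hsubnw x hx), c2, c3⟩

-- the two connectivity verdicts agree

theorem conn_eq (graph : List (Int × List Int)) (hpre : Pre_check graph) :
    aIsConnected graph = !(bConnFail graph) := by
  have hb : bNonIso graph = aNonIso graph := rfl
  cases hcase : aNonIso graph with
  | nil => unfold aIsConnected bConnFail; rw [hb, hcase]; rfl
  | cons s rest =>
    unfold aIsConnected bConnFail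
    rw [hb, hcase]
    dsimp only
    have hadd : PySem.Set.add PySem.Set.empty s = [s] := rfl
    have hskey : s ∈ graph.map Prod.fst := by
      have : s ∈ aNonIso graph := by rw [hcase]; exact List.mem_cons_self
      exact (List.mem_filter.mp this).1
    have hsing : ∀ x ∈ ([s] : List Int), Reach graph s x := by
      intro x hx; rw [List.mem_singleton.mp hx]; exact Reach.base
    have hRK : ∀ v, Reach graph s v → v ∈ graph.map Prod.fst := by
      intro v hv
      apply hpre.2 s (by rw [preStart_eq_take_aNonIso, hcase]; simp)
      exact reach_sub_preReach graph s v hv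
    obtain ⟨aC1, aC2, aC3⟩ := aLoop_spec graph s hRK (2 * graph.length + 2) [s] [s]
      (fun x hx => hx) (by simp) (by simp) hsing
      (fun u hu => Or.inl hu)
      (by have := unvis_le graph [s]; simp only [List.length_singleton]; omega)
    obtain ⟨bC1, bC2, bC3⟩ := bLoop_spec graph s hRK (graph.length + 1) [s]
      (by simp) (by intro x hx; rw [List.mem_singleton.mp hx]; exact hskey) hsing
      (by have := unvis_le graph [s]; omega)
    rw [hadd]
    set V := aLoop graph (2 * graph.length + 2) [s] [s] with hV
    set C := bLoop graph (graph.length + 1) [s] with hC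
    have hsV : s ∈ V := aC1 s (List.mem_singleton_self s)
    have hsC : s ∈ C := bC1 s (List.mem_singleton_self s)
    have hVC : ∀ x, x ∈ V ↔ x ∈ C := fun x =>
      ⟨fun h => reach_closed graph s C hsC bC3 x (aC2 x h),
       fun h => reach_closed graph s V hsV aC3 x (bC2 x h)⟩
    rw [Bool.eq_iff_iff]
    simp only [List.all_eq_true, Bool.not_eq_true', List.any_eq_false, Bool.not_eq_false]
    constructor
    · intro h v hv
      rw [PySem.Set.contains_iff]
      exact (hVC v).mp ((PySem.Set.contains_iff V v).mp (h v hv))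
    · intro h v hv
      rw [PySem.Set.contains_iff]
      exact (hVC v).mpr ((PySem.Set.contains_iff C v).mp (h v hv))

-- the two odd-degree counts agree

theorem odd_eq (graph : List (Int × List Int)) (hpre : Pre_check graph) :
    (graph.map Prod.fst).countP (fun v => (aAdj graph v).length % 2 == 1)
      = (graph.map (fun p => p.2.length % 2)).sum := by
  rw [List.countP_map]
  have hcg : ∀ p ∈ graph, ((fun v => (aAdj graph v).length % 2 == 1) ∘ Prod.fst) p
      = true ↔ (fun p : Int × List Int => p.2.length % 2 == 1) p = true := by
    intro p hp
    simp only [Function.comp]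
    rw [lookup_eq_snd graph hpre.1 p hp]
  rw [List.countP_congr hcg, sum_mod2]

-- ===== VERDICT (by name: the statement is the Claim_ definition above) =====


-- ===== VERDICT (by name: the statement is the Claim_ definition above) =====
theorem check_spec : Claim_equal_check := by
  intro graph _ hpre
  unfold Spec_check check check_alt
  rw [conn_eq graph hpre, odd_eq graph hpre]
  simp
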